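-- pv_equiv track=rewrite | github.com/ShaiDahan-code/Introduction-to-Computer-Science-in-Python-Course | Home Work - Python/Home Work 3 Calender/stats.py | high_number_and_spot
-- ===== SOURCE A (Python) =====
-- def high_number_and_spot(alist):
--     "search for the higher number and save is spot"
--     spot = 0
--     high_num = alist[0]
--     for i in range(0 , len(alist)):
--         if alist[i] >= high_num:
--             high_num = alist[i]
--             spot = i+1
--     return (" max number is: {0}, his spot is: {1}".format(high_num,spot))
-- ===== SOURCE B (Python) =====
-- def high_number_and_spot(alist):
--     "search for the higher number and save is spot"
--     high_num = max(alist)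
--     spot = len(alist) - alist[::-1].index(high_num)
--     return (" max number is: {0}, his spot is: {1}".format(high_num, spot))
-- ===== Notes on version B (the rewrite author's own statement) =====
-- stated objective: idiomatic
-- what changed: Replaces the index-tracking scan with max() followed by locating the last occurrence via a reversed-list index.
import Mathlib
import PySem

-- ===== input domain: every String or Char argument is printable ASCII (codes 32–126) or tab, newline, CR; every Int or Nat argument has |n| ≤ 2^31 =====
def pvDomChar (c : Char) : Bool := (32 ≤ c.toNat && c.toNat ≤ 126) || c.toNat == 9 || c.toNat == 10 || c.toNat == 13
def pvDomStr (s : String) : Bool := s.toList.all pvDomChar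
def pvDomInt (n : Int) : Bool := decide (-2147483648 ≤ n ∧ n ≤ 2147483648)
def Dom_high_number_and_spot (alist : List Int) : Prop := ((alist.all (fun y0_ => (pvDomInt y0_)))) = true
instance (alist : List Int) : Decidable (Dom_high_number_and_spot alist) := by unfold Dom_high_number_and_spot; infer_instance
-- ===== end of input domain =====

-- B replaces A's index-tracking scan with max() then locating the last occurrence via a reversed-list
-- index (idiomatic; same cost). Both raise on the empty list, which Pre_ excludes.


-- ===== PORT A =====
-- one loop step of A: if alist[i] >= high_num: high_num = alist[i]; spot = i+1
def pvStepA (alist : List Int) (st : Int × Int) (i : Int) : Int × Int :=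
  if PySem.List.pyGetD alist i 0 ≥ st.1 then (PySem.List.pyGetD alist i 0, i + 1) else st

def high_number_and_spot (alist : List Int) : String :=
  match alist with
  | [] => ""   -- alist[0] raises IndexError; excluded by Pre_
  | a0 :: _ =>
    let st := (PySem.List.pyRange 0 (PySem.List.len alist) 1).foldl (pvStepA alist) (a0, 0)
    " max number is: " ++ PySem.Int.toStr st.1 ++ ", his spot is: " ++ PySem.Int.toStr st.2

-- ===== PORT B =====
def high_number_and_spot_alt (alist : List Int) : String :=
  match PySem.List.max? alist id with
  | none => ""   -- max([]) raises ValueError; excluded by Pre_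
  | some high_num =>
    -- spot = len(alist) - alist[::-1].index(high_num); .index cannot raise since high_num ∈ alist
    let rev := (PySem.List.slice? alist none none (-1)).getD []
    let spot : Int := PySem.List.len alist - ((PySem.List.index? rev high_num).getD 0 : Int)
    " max number is: " ++ PySem.Int.toStr high_num ++ ", his spot is: " ++ PySem.Int.toStr spot

-- ===== PRECONDITION & SPEC =====
-- Pre_ excludes only the empty list, on which A raises IndexError (and B raises ValueError).
def Pre_high_number_and_spot (alist : List Int) : Prop := alist ≠ []
instance (alist : List Int) : Decidable (Pre_high_number_and_spot alist) := by unfold Pre_high_number_and_spot; infer_instance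
def pvWitness_high_number_and_spot : List Int := [1, 3, 2, 3]

def Spec_high_number_and_spot (alist : List Int) (out : String) : Prop := out = high_number_and_spot_alt alist
instance (alist : List Int) (out : String) : Decidable (Spec_high_number_and_spot alist out) := by unfold Spec_high_number_and_spot; infer_instance

-- ===== CLAIM (what is proved, stated in full; the proofs are below) =====
def Claim_equal_high_number_and_spot : Prop := ∀ (alist : List Int), Dom_high_number_and_spot alist → Pre_high_number_and_spot alist → Spec_high_number_and_spot alist (high_number_and_spot alist)

-- ===== LEMMAS AND PROOFS =====

-- The loop invariant: over any nonempty list, A's fold produces the maximum value and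
-- (length − index of the maximum in the reversed list), i.e. the last 1-based position.
theorem pvLoopA (xs : List Int) (hne : xs ≠ []) (r : Int × Int)
    (hr : r = (PySem.List.pyRange 0 (xs.length : Int) 1).foldl (pvStepA xs) (xs.headD 0, 0)) :
    r.1 ∈ xs ∧ (∀ y ∈ xs, y ≤ r.1) ∧
      r.2 = (xs.length : Int) - ((PySem.List.index? xs.reverse r.1).getD 0 : Int) := by
  subst hr
  induction xs using List.reverseRecOn with
  | nil => exact absurd rfl hne
  | append_singleton ys x ih =>
    by_cases hys : ys = []
    · subst hys
      simp only [List.nil_append, List.length_singleton]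
      rw [show ((1 : Nat) : Int) = 0 + 1 by norm_num, PySem.List.pyRange_one_succ_right (by norm_num)]
      simp [pvStepA, PySem.List.pyRange, PySem.List.index?, PySem.List.pyGetD]
    · have hlen : (((ys ++ [x]).length : Nat) : Int) = (ys.length : Int) + 1 := by
        simp
      rw [hlen, PySem.List.pyRange_one_succ_right (by positivity), List.foldl_append]
      have hhead : (ys ++ [x]).headD 0 = ys.headD 0 := by
        cases ys with | nil => exact absurd rfl hys | cons a t => simp
      rw [hhead]
      -- over the first ys.length indices, stepping with (ys ++ [x]) equals stepping with ys
      have hcongr : (PySem.List.pyRange 0 (ys.length : Int) 1).foldl (pvStepA (ys ++ [x])) (ys.headD 0, 0)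
          = (PySem.List.pyRange 0 (ys.length : Int) 1).foldl (pvStepA ys) (ys.headD 0, 0) := by
        apply PySem.List.foldl_congr_mem
        intro acc i hi
        have hib := (PySem.List.mem_pyRange_one).1 hi
        obtain ⟨k, hk, rfl⟩ : ∃ k : Nat, k < ys.length ∧ (k : Int) = i := ⟨i.toNat, by omega, by omega⟩
        unfold pvStepA
        rw [PySem.List.pyGetD_natCast, PySem.List.pyGetD_natCast,
          List.getD_eq_getElem?_getD, List.getD_eq_getElem?_getD,
          List.getElem?_append_left hk]
      rw [hcongr]
      obtain ⟨hmem, hmax, hspot⟩ := ih hys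
      set r := (PySem.List.pyRange 0 (ys.length : Int) 1).foldl (pvStepA ys) (ys.headD 0, 0) with hr
      -- the last step reads element x at index ys.length
      have hget : PySem.List.pyGetD (ys ++ [x]) (ys.length : Int) 0 = x := by
        rw [PySem.List.pyGetD_natCast, List.getD_eq_getElem?_getD, List.getElem?_append_right (le_refl _)]
        simp
      simp only [List.foldl_cons, List.foldl_nil]
      unfold pvStepA
      rw [hget]
      rw [List.reverse_append, List.reverse_singleton, List.singleton_append]
      by_cases hge : x ≥ r.1
      · rw [if_pos hge]
        refine ⟨by simp, ?_, ?_⟩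
        · intro y hy
          rcases List.mem_append.1 hy with h | h
          · exact le_trans (hmax y h) hge
          · simp at h; omega
        · rw [PySem.List.index?_cons_self]
          simp
      · rw [if_neg hge]
        have hneq : x ≠ r.1 := by intro h; exact hge (le_of_eq h.symm)
        refine ⟨List.mem_append.2 (Or.inl hmem), ?_, ?_⟩
        · intro y hy
          rcases List.mem_append.1 hy with h | h
          · exact hmax y h
          · simp at h; subst h; omega
        · rw [PySem.List.index?_cons_of_ne _ hneq]
          have hsome : (PySem.List.index? ys.reverse r.1).isSome = true :=
            (PySem.List.index?_isSome_iff _ _).2 (List.mem_reverse.2 hmem)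
          obtain ⟨k, hk⟩ := Option.isSome_iff_exists.1 hsome
          rw [hk] at hspot ⊢
          simp only [Option.map_some, Option.getD_some] at hspot ⊢
          push_cast
          omega

-- ===== VERDICT (by name: the statement is the Claim_ definition above) =====
theorem high_number_and_spot_spec : Claim_equal_high_number_and_spot := by
  intro alist _ hpre
  unfold Spec_high_number_and_spot
  match halist : alist with
  | [] => exact absurd rfl hpre
  | a0 :: rest =>
    have hlen : PySem.List.len (a0 :: rest) = ((a0 :: rest).length : Int) := by
      simp [PySem.List.len]
    obtain ⟨hmem, hmax, hspot⟩ := pvLoopA (a0 :: rest) (by simp)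
      ((PySem.List.pyRange 0 ((a0 :: rest).length : Int) 1).foldl (pvStepA (a0 :: rest)) (a0, 0))
      (by rw [List.headD_cons])
    set r := (PySem.List.pyRange 0 ((a0 :: rest).length : Int) 1).foldl (pvStepA (a0 :: rest)) (a0, 0) with hr
    have hmaxsome : ∃ m, PySem.List.max? (a0 :: rest) id = some m := by
      cases hm : PySem.List.max? (a0 :: rest) (id : Int → Int) with
      | none => exact absurd hm (by simp [PySem.List.max?_eq_none_iff])
      | some m => exact ⟨m, rfl⟩
    obtain ⟨m, hm⟩ := hmaxsome
    have hmval : m = r.1 := by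
      have h1 : m ≤ r.1 := hmax m (PySem.List.max?_mem hm)
      have h2 : r.1 ≤ m := by simpa using PySem.List.max?_isMax hm r.1 hmem
      omega
    unfold high_number_and_spot high_number_and_spot_alt
    rw [hm, PySem.List.slice?_none_none_neg_one]
    simp only [Option.getD_some, hmval, hlen, ← hr]
    rw [hspot]
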